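-- pv_equiv track=rewrite | github.com/cwoodall/pitch-shifter-py | pitchshifter/vocoder.py | getRegionOfInfluence
-- ===== SOURCE A (Python) =====
-- def getRegionOfInfluence(peaks):
--     """
--     Args:
--       List of peaks
--
--     Returns:
--       Array of tuples with (roi_start, roi_end) inclusive
--     """
--     roi = []
--     last_mid_point = 0
--     for i in range(len(peaks)-1):
--         current_mid_point = int((peaks[i+1] - peaks[i])/2.0) + peaks[i]
--         roi.append((last_mid_point, current_mid_point))
--         last_mid_point = int(current_mid_point)+1
--
--     # Handle last midpoint
--     roi.append((last_mid_point,None))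
--     return roi
-- ===== SOURCE B (Python) =====
-- def getRegionOfInfluence(peaks):
--     """
--     Args:
--       List of peaks
--
--     Returns:
--       Array of tuples with (roi_start, roi_end) inclusive
--     """
--     n = len(peaks)
--     if n == 0:
--         return [(0, None)]
--
--     def mid(i):
--         return int((peaks[i + 1] - peaks[i]) / 2.0) + peaks[i]
--
--     return [(0 if i == 0 else mid(i - 1) + 1,
--              mid(i) if i < n - 1 else None)
--             for i in range(n)]
-- ===== Notes on version B (the rewrite author's own statement) =====
-- stated objective: alternative
-- what changed: Replaces A's sequential loop, which threads last_mid_point through mutable state while appending to roi, with a stateless per-index closed form: interval i is computed independently from its local peak window (start = mid(i-1)+1 or 0, end = mid(i) or None), eliminating the carried recurrence (each midpoint is recomputed locally instead of remembered).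
import Mathlib
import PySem

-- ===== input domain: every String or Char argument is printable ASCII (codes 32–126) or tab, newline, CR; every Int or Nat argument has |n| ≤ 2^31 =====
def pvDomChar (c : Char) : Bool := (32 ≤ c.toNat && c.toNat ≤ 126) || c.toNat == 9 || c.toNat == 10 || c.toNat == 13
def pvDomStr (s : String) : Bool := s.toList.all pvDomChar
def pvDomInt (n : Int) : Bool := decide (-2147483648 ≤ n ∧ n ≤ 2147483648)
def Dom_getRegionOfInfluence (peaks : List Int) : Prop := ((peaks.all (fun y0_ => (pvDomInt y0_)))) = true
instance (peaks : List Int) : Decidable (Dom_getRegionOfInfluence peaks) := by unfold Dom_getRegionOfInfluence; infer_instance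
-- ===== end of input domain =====

-- B replaces A's sequential loop threading last_mid_point with a stateless per-index closed form: interval i is
-- computed independently from its local peak window; objective: alternative, no speed claimed.
-- int((x)/2.0) is ported as PySem.Int.truncdiv, exact since |peaks[i+1]-peaks[i]| ≤ 2^32 < 2^53 on Dom.

-- ===== PORT A =====
def getRegionOfInfluence (peaks : List Int) : List (Int × Option Int) :=
  let loop := (PySem.List.pyRange 0 ((peaks.length : Int) - 1) 1).foldl
    (fun (st : List (Int × Option Int) × Int) i =>
      let cur := PySem.Int.truncdiv (PySem.List.pyGetD peaks (i + 1) 0 - PySem.List.pyGetD peaks i 0) 2 + PySem.List.pyGetD peaks i 0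
      (st.1 ++ [(st.2, some cur)], cur + 1))
    ([], 0)
  loop.1 ++ [(loop.2, none)]

-- ===== PORT B =====
-- Source B's local helper mid(i)
def pvMid (peaks : List Int) (i : Int) : Int :=
  PySem.Int.truncdiv (PySem.List.pyGetD peaks (i + 1) 0 - PySem.List.pyGetD peaks i 0) 2 + PySem.List.pyGetD peaks i 0

def getRegionOfInfluence_alt (peaks : List Int) : List (Int × Option Int) :=
  if peaks.length = 0 then [(0, none)]
  else
    (PySem.List.pyRange 0 (peaks.length : Int) 1).map (fun i =>
      ((if i = 0 then 0 else pvMid peaks (i - 1) + 1),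
       (if i < (peaks.length : Int) - 1 then some (pvMid peaks i) else none)))

-- ===== PRECONDITION & SPEC =====
def Spec_getRegionOfInfluence (peaks : List Int) (out : List (Int × Option Int)) : Prop := out = getRegionOfInfluence_alt peaks
instance (peaks : List Int) (out : List (Int × Option Int)) : Decidable (Spec_getRegionOfInfluence peaks out) := by unfold Spec_getRegionOfInfluence; infer_instance

-- ===== CLAIM (what is proved, stated in full; the proofs are below) =====
def Claim_equal_getRegionOfInfluence : Prop := ∀ (peaks : List Int), Dom_getRegionOfInfluence peaks → Spec_getRegionOfInfluence peaks (getRegionOfInfluence peaks)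

-- ===== LEMMAS AND PROOFS =====

-- proof helpers: the list of successive midpoints, and the sequential interval build replayed over it
def pvMids : List Int → List Int
  | a :: b :: t => (PySem.Int.truncdiv (b - a) 2 + a) :: pvMids (b :: t)
  | _ => []

def pvGo' (s : Int) : List Int → List (Int × Option Int)
  | [] => [(s, none)]
  | m :: ms => (s, some m) :: pvGo' (m + 1) ms

-- A's accumulator loop over any midpoint list equals pvGo'
theorem roi_fold_eq_go' (ms : List Int) (acc : List (Int × Option Int)) (s : Int) :
    (ms.foldl (fun (st : List (Int × Option Int) × Int) m => (st.1 ++ [(st.2, some m)], m + 1)) (acc, s)).1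
      ++ [((ms.foldl (fun (st : List (Int × Option Int) × Int) m => (st.1 ++ [(st.2, some m)], m + 1)) (acc, s)).2, none)]
    = acc ++ pvGo' s ms := by
  induction ms generalizing acc s with
  | nil => simp [pvGo']
  | cons m t ih =>
      simp only [List.foldl_cons, pvGo']
      rw [ih]
      simp

theorem pyGetD_succ_shift (x : Int) (xs : List Int) (i : Int) (h : 0 ≤ i) :
    PySem.List.pyGetD (x :: xs) (i + 1) 0 = PySem.List.pyGetD xs i 0 := by
  rw [PySem.List.pyGetD_of_nonneg (x :: xs) 0 (by omega), PySem.List.pyGetD_of_nonneg xs 0 h]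
  have : (i + 1).toNat = i.toNat + 1 := by omega
  rw [this, List.getD_cons_succ]

-- A's indexed midpoint comprehension equals the structural midpoint list
theorem map_range_eq_mids (peaks : List Int) :
    (PySem.List.pyRange 0 ((peaks.length : Int) - 1) 1).map (pvMid peaks) = pvMids peaks := by
  induction peaks with
  | nil => simp [pvMids, PySem.List.pyRange_one_eq_nil]
  | cons a t ih =>
      cases t with
      | nil => simp [pvMids, PySem.List.pyRange_one_eq_nil]
      | cons b r =>
          rw [PySem.List.pyRange_one_cons (by simp)]
          simp only [List.map_cons, pvMids]
          congr 1
          · unfold pvMid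
            rw [pyGetD_succ_shift a (b :: r) 0 le_rfl]
            simp [PySem.List.pyGetD_zero_cons]
          · rw [← ih]
            simp only [PySem.List.pyRange_one]
            have hL : (((a :: b :: r).length : Int) - 1 - (0 + 1)).toNat
                = (((b :: r).length : Int) - 1 - 0).toNat := by simp
            rw [hL, List.map_map, List.map_map]
            refine List.map_congr_left (fun k hk => ?_)
            simp only [Function.comp]
            unfold pvMid
            rw [show (0 : Int) + 1 + (k : Int) = (0 + (k : Int)) + 1 from by ring]
            rw [pyGetD_succ_shift a (b :: r) ((0 : Int) + (k : Int) + 1) (by omega),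
                pyGetD_succ_shift a (b :: r) ((0 : Int) + (k : Int)) (by omega)]

theorem pvGo'_length (ms : List Int) (s : Int) : (pvGo' s ms).length = ms.length + 1 := by
  induction ms generalizing s with
  | nil => simp [pvGo']
  | cons m t ih => simp [pvGo', ih]

theorem pvMids_length (peaks : List Int) : (pvMids peaks).length = peaks.length - 1 := by
  rw [← map_range_eq_mids, List.length_map, PySem.List.length_pyRange_one]
  omega

theorem pvGo'_getElem? (ms : List Int) (s : Int) (k : Nat) (hk : k < ms.length + 1) :
    (pvGo' s ms)[k]? = some ((if k = 0 then s else ms.getD (k - 1) 0 + 1),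
                             (if k < ms.length then some (ms.getD k 0) else none)) := by
  induction ms generalizing s k with
  | nil =>
      have : k = 0 := by simp at hk; omega
      subst this
      simp [pvGo']
  | cons m t ih =>
      cases k with
      | zero => simp [pvGo']
      | succ j =>
          simp only [pvGo', List.getElem?_cons_succ]
          rw [ih (m + 1) j (by simp at hk ⊢; omega)]
          cases j with
          | zero => simp
          | succ j' => simp

theorem pvMids_getD (peaks : List Int) (j : Nat) (hj : j < peaks.length - 1) :
    (pvMids peaks).getD j 0 = pvMid peaks (j : Int) := by
  rw [← map_range_eq_mids]
  have h1 : ((peaks.length : Int) - 1) = ((peaks.length - 1 : Nat) : Int) := by omega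
  rw [h1, ← PySem.List.pyGetD_natCast, PySem.List.pyGetD_map_pyRange (pvMid peaks) _ j 0 hj]

theorem go'_mids_eq_alt (peaks : List Int) :
    pvGo' 0 (pvMids peaks) = getRegionOfInfluence_alt peaks := by
  unfold getRegionOfInfluence_alt
  by_cases hn : peaks.length = 0
  · rw [if_pos hn]
    have : peaks = [] := List.length_eq_zero_iff.mp hn
    subst this
    simp [pvMids, pvGo']
  · rw [if_neg hn]
    apply List.ext_getElem?
    intro k
    by_cases hk : k < peaks.length
    · rw [pvGo'_getElem? _ 0 k (by rw [pvMids_length]; omega)]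
      rw [PySem.List.getElem?_map_pyRange_zero _ _ k hk]
      congr 1
      rw [pvMids_length, Prod.mk.injEq]
      constructor
      · by_cases h0 : k = 0
        · subst h0; simp
        · rw [if_neg h0, if_neg (by omega : ¬ (k : Int) = 0)]
          rw [pvMids_getD peaks (k - 1) (by omega)]
          congr 2
          omega
      · by_cases hlt : k < peaks.length - 1
        · rw [if_pos hlt, if_pos (by omega : (k : Int) < (peaks.length : Int) - 1)]
          rw [pvMids_getD peaks k hlt]
        · rw [if_neg hlt, if_neg (by omega : ¬ (k : Int) < (peaks.length : Int) - 1)]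
    · rw [List.getElem?_eq_none (by rw [pvGo'_length, pvMids_length]; omega),
          List.getElem?_eq_none (by rw [List.length_map, PySem.List.length_pyRange_one]; omega)]

-- ===== VERDICT (by name: the statement is the Claim_ definition above) =====
theorem getRegionOfInfluence_spec : Claim_equal_getRegionOfInfluence := by
  intro peaks _
  show _ = _
  unfold getRegionOfInfluence
  rw [← List.foldl_map (f := fun i => PySem.Int.truncdiv (PySem.List.pyGetD peaks (i + 1) 0 - PySem.List.pyGetD peaks i 0) 2 + PySem.List.pyGetD peaks i 0)
        (g := fun (st : List (Int × Option Int) × Int) m => (st.1 ++ [(st.2, some m)], m + 1))]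
  rw [show (fun i => PySem.Int.truncdiv (PySem.List.pyGetD peaks (i + 1) 0 - PySem.List.pyGetD peaks i 0) 2 + PySem.List.pyGetD peaks i 0) = pvMid peaks from rfl]
  rw [map_range_eq_mids, roi_fold_eq_go']
  simpa using go'_mids_eq_alt peaks
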